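-- pv_equiv track=rewrite | github.com/mohammadfaiizan/ProjectI | DSA/Problem/Graph/03_Breadth_First_Search_BFS/1306_Jump_Game_III.py | canReach_approach1_bfs
-- ===== SOURCE A (Python) =====
-- from typing import List
-- from collections import deque
--
-- def canReach_approach1_bfs(arr: List[int], start: int) -> bool:
--     """
--     Approach 1: BFS (Optimal)
--
--     Use BFS to explore all reachable indices from start.
--
--     Time: O(N) - visit each index at most once
--     Space: O(N) - queue and visited set
--     """
--     if not arr or start >= len(arr):
--         return False
--
--     n = len(arr)
--
--     # Check if start position has value 0
--     if arr[start] == 0: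
--         return True
--
--     queue = deque([start])
--     visited = {start}
--
--     while queue:
--         current = queue.popleft()
--
--         # Calculate next possible positions
--         next_positions = [current + arr[current], current - arr[current]]
--
--         for next_pos in next_positions:
--             # Check bounds
--             if 0 <= next_pos < n and next_pos not in visited:
--                 # Check if we found a zero
--                 if arr[next_pos] == 0:
--                     return True
--
--                 visited.add(next_pos)
--                 queue.append(next_pos)
--
--     return False
-- ===== SOURCE B (Python) =====
-- def canReach_approach1_bfs(arr, start):
--     """Iterative DFS with an explicit stack; visited checked at pop time."""
--     n = len(arr)
--     if not (-n <= start < n):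
--         return False
--     stack = [start]
--     visited = set()
--     while stack:
--         i = stack.pop()
--         if i in visited:
--             continue
--         visited.add(i)
--         if arr[i] == 0:
--             return True
--         for nxt in (i + arr[i], i - arr[i]):
--             if 0 <= nxt < n:
--                 stack.append(nxt)
--     return False
-- ===== Notes on version B (the rewrite author's own statement) =====
-- stated objective: alternative
-- what changed: Replaced the BFS worklist (deque popped from the front, visited set updated and zero-test performed at push time, separate pre-loop check of arr[start]) by an explicit-stack iterative DFS that pops, skips already-visited indices, tests for zero and marks visited at pop time, pushing both next positions unconditionally after a bounds check.
-- outside the precondition, e.g. on canReach_approach1_bfs([1], -2): A raises IndexError, B returns False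
-- crash fix: On nonempty arr with start < -len(arr), A raises IndexError at arr[start]; B's bounds guard returns False there. — e.g. on canReach_approach1_bfs([1], -2): A raises IndexError, B returns false
import Mathlib
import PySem

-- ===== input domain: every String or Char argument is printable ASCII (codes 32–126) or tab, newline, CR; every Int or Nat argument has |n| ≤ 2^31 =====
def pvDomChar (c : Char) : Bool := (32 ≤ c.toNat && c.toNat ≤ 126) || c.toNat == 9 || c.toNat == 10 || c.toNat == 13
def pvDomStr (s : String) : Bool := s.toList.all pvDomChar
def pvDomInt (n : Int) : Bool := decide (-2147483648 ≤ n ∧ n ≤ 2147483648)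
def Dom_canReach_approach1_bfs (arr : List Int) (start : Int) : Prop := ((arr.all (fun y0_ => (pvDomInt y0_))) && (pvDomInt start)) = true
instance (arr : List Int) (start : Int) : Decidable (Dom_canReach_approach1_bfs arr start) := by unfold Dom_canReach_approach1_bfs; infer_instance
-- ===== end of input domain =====

-- B replaces A's BFS queue (visited-at-push, zero-check at push) by an explicit-stack DFS
-- (visited-at-pop, zero-check at pop): an alternative worklist decomposition of the same search;
-- where A raises IndexError (start < -len(arr)) B returns False (see Raises_).


-- ===== PORT A =====

-- arr[i] (Python wrap-around); the `.getD 0` default only fires outside Pre_ (where Python raises)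
def pvVal (arr : List Int) (i : Int) : Int := (PySem.List.pyGet? arr i).getD 0

-- `0 <= j < len(arr)`
abbrev pvInb (arr : List Int) (j : Int) : Prop := 0 ≤ j ∧ j < (arr.length : Int)

-- next_positions[0] = current + arr[current], next_positions[1] = current - arr[current]
def pvNx1 (arr : List Int) (i : Int) : Int := i + pvVal arr i
def pvNx2 (arr : List Int) (i : Int) : Int := i - pvVal arr i

-- the finite pool of indices A's loop can add to `visited`: used only by the termination measure
def pvPoolA (arr : List Int) : Finset Int := (Finset.range arr.length).image (fun k : Nat => (k : Int))

theorem pvPool_card_lt {S : Finset Int} {v : List Int} {x : Int}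
    (hx : x ∈ S) (hxv : x ∉ v) :
    (S \ (v ++ [x]).toFinset).card < (S \ v.toFinset).card := by
  have hsub : S \ (v ++ [x]).toFinset ⊆ S \ v.toFinset := by
    intro y hy
    simp only [Finset.mem_sdiff, List.toFinset_append, List.mem_toFinset, Finset.mem_union,
      List.toFinset_cons, List.toFinset_nil, Finset.mem_insert] at *
    tauto
  have hxmem : x ∈ S \ v.toFinset := by
    simp only [Finset.mem_sdiff, List.mem_toFinset]
    exact ⟨hx, hxv⟩
  have hxnot : x ∉ S \ (v ++ [x]).toFinset := by simp
  exact Finset.card_lt_card ⟨hsub, fun h => hxnot (h hxmem)⟩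

theorem pvInb_mem_poolA {arr : List Int} {x : Int} (hx : pvInb arr x) : x ∈ pvPoolA arr := by
  rcases hx with ⟨h0, h1⟩
  simp only [pvPoolA, Finset.mem_image, Finset.mem_range]
  exact ⟨x.toNat, by omega, by omega⟩

-- `while queue:` of A, transliterated: pop left, try both next positions in order;
-- each is bounds-checked and membership-checked before the zero test and the push.
def pvBfsLoop (arr : List Int) (queue visited : List Int) : Bool :=
  match queue with
  | [] => false
  | current :: rest =>
    if h1 : pvInb arr (pvNx1 arr current) ∧ pvNx1 arr current ∉ visited then
      if pvVal arr (pvNx1 arr current) = 0 then true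
      else if h2 : pvInb arr (pvNx2 arr current) ∧ pvNx2 arr current ∉ visited ++ [pvNx1 arr current] then
        if pvVal arr (pvNx2 arr current) = 0 then true
        else pvBfsLoop arr (rest ++ [pvNx1 arr current, pvNx2 arr current])
               ((visited ++ [pvNx1 arr current]) ++ [pvNx2 arr current])
      else pvBfsLoop arr (rest ++ [pvNx1 arr current]) (visited ++ [pvNx1 arr current])
    else if h2 : pvInb arr (pvNx2 arr current) ∧ pvNx2 arr current ∉ visited then
      if pvVal arr (pvNx2 arr current) = 0 then true
      else pvBfsLoop arr (rest ++ [pvNx2 arr current]) (visited ++ [pvNx2 arr current])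
    else pvBfsLoop arr rest visited
termination_by 2 * ((pvPoolA arr) \ visited.toFinset).card + queue.length
decreasing_by
  · have c1 := pvPool_card_lt (pvInb_mem_poolA h1.1) h1.2
    have c2 := pvPool_card_lt (v := visited ++ [pvNx1 arr current])
        (pvInb_mem_poolA h2.1) h2.2
    simp only [List.length_append, List.length_cons, List.length_nil]
    omega
  · have c1 := pvPool_card_lt (pvInb_mem_poolA h1.1) h1.2
    simp only [List.length_append, List.length_cons, List.length_nil]
    omega
  · have c2 := pvPool_card_lt (pvInb_mem_poolA h2.1) h2.2
    simp only [List.length_append, List.length_cons, List.length_nil]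
    omega
  · simp only [List.length_cons]; omega

def canReach_approach1_bfs (arr : List Int) (start : Int) : Bool :=
  if arr = [] ∨ (arr.length : Int) ≤ start then false
  else if pvVal arr start = 0 then true
  else pvBfsLoop arr [start] [start]

-- ===== PORT B =====

-- pool for B's measure: every index B's stack can hold (start included, it satisfies -n ≤ start < n)
def pvPoolB (arr : List Int) : Finset Int :=
  (Finset.range (2 * arr.length)).image (fun k : Nat => (k : Int) - arr.length)

theorem pvInb_mem_poolB {arr : List Int} {x : Int}
    (hx : -(arr.length : Int) ≤ x ∧ x < (arr.length : Int)) : x ∈ pvPoolB arr := by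
  simp only [pvPoolB, Finset.mem_image, Finset.mem_range]
  exact ⟨(x + arr.length).toNat, by omega, by omega⟩

-- `while stack:` of B, transliterated; the Lean list's HEAD is the Python list's END (the stack
-- top), so `stack.pop()` is the head and `stack.append(x)` conses x; the two pushes of
-- `for nxt in (i + arr[i], i - arr[i])` therefore appear in reverse order.
-- hstk carries the bounds invariant on stack entries, used only for termination.
def pvDfsLoop (arr : List Int) (stack visited : List Int)
    (hstk : ∀ x ∈ stack, -(arr.length : Int) ≤ x ∧ x < (arr.length : Int)) : Bool :=
  match stack with
  | [] => false
  | i :: rest =>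
    if i ∈ visited then
      pvDfsLoop arr rest visited (fun x hx => hstk x (List.mem_cons_of_mem i hx))
    else if pvVal arr i = 0 then true
    else
      if h1 : pvInb arr (pvNx1 arr i) then
        if h2 : pvInb arr (pvNx2 arr i) then
          pvDfsLoop arr (pvNx2 arr i :: pvNx1 arr i :: rest) (visited ++ [i])
            (by
              intro x hx
              rcases hx with _ | ⟨_, hx⟩
              · exact ⟨by have := h2.1; omega, h2.2⟩
              · rcases hx with _ | ⟨_, hx⟩
                · exact ⟨by have := h1.1; omega, h1.2⟩
                · exact hstk x (List.mem_cons_of_mem i hx))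
        else
          pvDfsLoop arr (pvNx1 arr i :: rest) (visited ++ [i])
            (by
              intro x hx
              rcases hx with _ | ⟨_, hx⟩
              · exact ⟨by have := h1.1; omega, h1.2⟩
              · exact hstk x (List.mem_cons_of_mem i hx))
      else
        if h2 : pvInb arr (pvNx2 arr i) then
          pvDfsLoop arr (pvNx2 arr i :: rest) (visited ++ [i])
            (by
              intro x hx
              rcases hx with _ | ⟨_, hx⟩
              · exact ⟨by have := h2.1; omega, h2.2⟩
              · exact hstk x (List.mem_cons_of_mem i hx))
        else
          pvDfsLoop arr rest (visited ++ [i]) (fun x hx => hstk x (List.mem_cons_of_mem i hx))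
termination_by 2 * ((pvPoolB arr) \ visited.toFinset).card + stack.length
decreasing_by
  all_goals
    first
    | (simp only [List.length_cons]; omega)
    | (have c1 := pvPool_card_lt (pvInb_mem_poolB (hstk i (List.mem_cons_self))) ‹i ∉ visited›
       simp only [List.length_cons]
       omega)

def canReach_approach1_bfs_alt (arr : List Int) (start : Int) : Bool :=
  if h : -(arr.length : Int) ≤ start ∧ start < (arr.length : Int) then
    pvDfsLoop arr [start] []
      (fun x hx => by rcases hx with _ | ⟨_, hx⟩; exact h; cases hx)
  else false

-- ===== PRECONDITION & SPEC =====
-- Pre_ excludes exactly the inputs where Python A raises IndexError: nonempty arr with start < -len(arr).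
def Pre_canReach_approach1_bfs (arr : List Int) (start : Int) : Prop :=
  arr = [] ∨ -(arr.length : Int) ≤ start
instance (arr : List Int) (start : Int) : Decidable (Pre_canReach_approach1_bfs arr start) := by
  unfold Pre_canReach_approach1_bfs; infer_instance

def pvWitness_canReach_approach1_bfs : List Int × Int := ([1, 0], 0)

-- On nonempty arr with start < -len(arr), A raises IndexError (arr[start]); B returns False.
def Raises_canReach_approach1_bfs (arr : List Int) (start : Int) : Prop :=
  arr ≠ [] ∧ start < -(arr.length : Int)
instance (arr : List Int) (start : Int) : Decidable (Raises_canReach_approach1_bfs arr start) := by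
  unfold Raises_canReach_approach1_bfs; infer_instance

def pvRaiseWitness_canReach_approach1_bfs : List Int × Int := ([1], -2)
def pvRaiseWitnessOut_canReach_approach1_bfs : Bool := false

def Spec_canReach_approach1_bfs (arr : List Int) (start : Int) (out : Bool) : Prop :=
  out = canReach_approach1_bfs_alt arr start
instance (arr : List Int) (start : Int) (out : Bool) : Decidable (Spec_canReach_approach1_bfs arr start out) := by
  unfold Spec_canReach_approach1_bfs; infer_instance

-- ===== CLAIM (what is proved, stated in full; the proofs are below) =====
def Claim_equal_canReach_approach1_bfs : Prop :=
  ∀ (arr : List Int) (start : Int), Dom_canReach_approach1_bfs arr start →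
    Pre_canReach_approach1_bfs arr start →
    Spec_canReach_approach1_bfs arr start (canReach_approach1_bfs arr start)

def Claim_raises_canReach_approach1_bfs : Prop :=
  (∀ (arr : List Int) (start : Int), Dom_canReach_approach1_bfs arr start →
      Raises_canReach_approach1_bfs arr start → ¬ Pre_canReach_approach1_bfs arr start) ∧
  (Dom_canReach_approach1_bfs (pvRaiseWitness_canReach_approach1_bfs.1) (pvRaiseWitness_canReach_approach1_bfs.2) ∧
   Raises_canReach_approach1_bfs (pvRaiseWitness_canReach_approach1_bfs.1) (pvRaiseWitness_canReach_approach1_bfs.2) ∧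
   canReach_approach1_bfs_alt (pvRaiseWitness_canReach_approach1_bfs.1) (pvRaiseWitness_canReach_approach1_bfs.2) =
     pvRaiseWitnessOut_canReach_approach1_bfs)

-- ===== LEMMAS AND PROOFS =====

-- one hop of the search: j is an in-bounds next position of i
def pvEdge (arr : List Int) (i j : Int) : Prop :=
  (j = pvNx1 arr i ∨ j = pvNx2 arr i) ∧ pvInb arr j

-- j is reachable from s
def pvReach (arr : List Int) (s j : Int) : Prop := Relation.ReflTransGen (pvEdge arr) s j

theorem pvBfsLoop_sound (arr : List Int) (start : Int) :
    ∀ queue visited, (∀ x ∈ visited, pvReach arr start x) → (∀ x ∈ queue, x ∈ visited) →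
      pvBfsLoop arr queue visited = true →
      ∃ j, pvReach arr start j ∧ pvVal arr j = 0 := by
  intro queue visited
  induction queue, visited using pvBfsLoop.induct arr with
  | case1 visited =>
    intro _ _ ht
    rw [pvBfsLoop] at ht
    cases ht
  | case2 visited current rest h1 z1 =>
    intro hv hq _
    exact ⟨pvNx1 arr current,
      Relation.ReflTransGen.tail (hv current (hq current List.mem_cons_self)) ⟨Or.inl rfl, h1.1⟩, z1⟩
  | case3 visited current rest h1 z1 h2 z2 =>
    intro hv hq _
    exact ⟨pvNx2 arr current,
      Relation.ReflTransGen.tail (hv current (hq current List.mem_cons_self)) ⟨Or.inr rfl, h2.1⟩, z2⟩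
  | case4 visited current rest h1 z1 h2 z2 ih =>
    intro hv hq ht
    rw [pvBfsLoop] at ht
    simp only [dif_pos h1, if_neg z1, dif_pos h2, if_neg z2] at ht
    have hcur : pvReach arr start current := hv current (hq current List.mem_cons_self)
    refine ih ?_ ?_ ht
    · intro x hx
      simp only [List.mem_append, List.mem_singleton] at hx
      rcases hx with (hx | rfl) | rfl
      · exact hv x hx
      · exact Relation.ReflTransGen.tail hcur ⟨Or.inl rfl, h1.1⟩
      · exact Relation.ReflTransGen.tail hcur ⟨Or.inr rfl, h2.1⟩
    · intro x hx
      simp only [List.mem_append, List.mem_cons, List.not_mem_nil, or_false] at hx ⊢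
      rcases hx with hx | hx | hx
      · exact Or.inl (Or.inl (hq x (List.mem_cons_of_mem _ hx)))
      · exact Or.inl (Or.inr hx)
      · exact Or.inr hx
  | case5 visited current rest h1 z1 h2 ih =>
    intro hv hq ht
    rw [pvBfsLoop] at ht
    simp only [dif_pos h1, if_neg z1, dif_neg h2] at ht
    have hcur : pvReach arr start current := hv current (hq current List.mem_cons_self)
    refine ih ?_ ?_ ht
    · intro x hx
      simp only [List.mem_append, List.mem_singleton] at hx
      rcases hx with hx | rfl
      · exact hv x hx
      · exact Relation.ReflTransGen.tail hcur ⟨Or.inl rfl, h1.1⟩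
    · intro x hx
      simp only [List.mem_append, List.mem_singleton] at hx ⊢
      rcases hx with hx | hx
      · exact Or.inl (hq x (List.mem_cons_of_mem _ hx))
      · exact Or.inr hx
  | case6 visited current rest h1 h2 z2 =>
    intro hv hq _
    exact ⟨pvNx2 arr current,
      Relation.ReflTransGen.tail (hv current (hq current List.mem_cons_self)) ⟨Or.inr rfl, h2.1⟩, z2⟩
  | case7 visited current rest h1 h2 z2 ih =>
    intro hv hq ht
    rw [pvBfsLoop] at ht
    simp only [dif_neg h1, dif_pos h2, if_neg z2] at ht
    have hcur : pvReach arr start current := hv current (hq current List.mem_cons_self)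
    refine ih ?_ ?_ ht
    · intro x hx
      simp only [List.mem_append, List.mem_singleton] at hx
      rcases hx with hx | rfl
      · exact hv x hx
      · exact Relation.ReflTransGen.tail hcur ⟨Or.inr rfl, h2.1⟩
    · intro x hx
      simp only [List.mem_append, List.mem_singleton] at hx ⊢
      rcases hx with hx | hx
      · exact Or.inl (hq x (List.mem_cons_of_mem _ hx))
      · exact Or.inr hx
  | case8 visited current rest h1 h2 ih =>
    intro hv hq ht
    rw [pvBfsLoop] at ht
    simp only [dif_neg h1, dif_neg h2] at ht
    exact ih hv (fun x hx => hq x (List.mem_cons_of_mem _ hx)) ht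

theorem pvBfsLoop_complete (arr : List Int) :
    ∀ queue visited,
      (∀ x ∈ visited, pvVal arr x ≠ 0) →
      (∀ x ∈ visited, x ∉ queue → ∀ j, pvEdge arr x j → j ∈ visited) →
      pvBfsLoop arr queue visited = false →
      ∀ x ∈ visited, ∀ k, pvReach arr x k → pvVal arr k ≠ 0 := by
  intro queue visited
  induction queue, visited using pvBfsLoop.induct arr with
  | case1 visited =>
    intro hnz hclo _ x hx k hk
    have hin : ∀ k, pvReach arr x k → k ∈ visited := by
      intro k hk
      induction hk with
      | refl => exact hx
      | tail h e ih => exact hclo _ ih (List.not_mem_nil) _ e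
    exact hnz k (hin k hk)
  | case2 visited current rest h1 z1 =>
    intro _ _ hf
    rw [pvBfsLoop] at hf
    simp only [dif_pos h1, if_pos z1] at hf
    cases hf
  | case3 visited current rest h1 z1 h2 z2 =>
    intro _ _ hf
    rw [pvBfsLoop] at hf
    simp only [dif_pos h1, if_neg z1, dif_pos h2, if_pos z2] at hf
    cases hf
  | case4 visited current rest h1 z1 h2 z2 ih =>
    intro hnz hclo hf
    rw [pvBfsLoop] at hf
    simp only [dif_pos h1, if_neg z1, dif_pos h2, if_neg z2] at hf
    have key := ih ?_ ?_ hf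
    · intro x hx k hk
      exact key x (by simp [hx]) k hk
    · intro x hx
      simp only [List.mem_append, List.mem_singleton] at hx
      rcases hx with (hx | rfl) | rfl
      · exact hnz x hx
      · exact z1
      · exact z2
    · intro x hx hnq j hej
      simp only [List.mem_append, List.mem_cons, List.not_mem_nil, or_false,
        not_or] at hnq
      simp only [List.mem_append, List.mem_singleton] at hx ⊢
      rcases hx with (hx | rfl) | rfl
      · by_cases hxc : x = current
        · subst hxc
          rcases hej with ⟨hor, hinb⟩
          rcases hor with rfl | rfl
          · exact Or.inl (Or.inr rfl)
          · exact Or.inr rfl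
        · have hxq : x ∉ current :: rest := by
            simp only [List.mem_cons, not_or]
            exact ⟨hxc, hnq.1⟩
          exact Or.inl (Or.inl (hclo x hx hxq j hej))
      · exact absurd (Or.inr (Or.inl rfl)) (by exact fun h => (by
          rcases h with h | h | h
          · exact hnq.1 h
          · exact hnq.2.1 h
          · exact hnq.2.2 h : False))
      · exact absurd (Or.inr (Or.inr rfl)) (by exact fun h => (by
          rcases h with h | h | h
          · exact hnq.1 h
          · exact hnq.2.1 h
          · exact hnq.2.2 h : False))
  | case5 visited current rest h1 z1 h2 ih =>
    intro hnz hclo hf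
    rw [pvBfsLoop] at hf
    simp only [dif_pos h1, if_neg z1, dif_neg h2] at hf
    have key := ih ?_ ?_ hf
    · intro x hx k hk
      exact key x (by simp [hx]) k hk
    · intro x hx
      simp only [List.mem_append, List.mem_singleton] at hx
      rcases hx with hx | rfl
      · exact hnz x hx
      · exact z1
    · intro x hx hnq j hej
      simp only [List.mem_append, List.mem_singleton, not_or] at hnq
      simp only [List.mem_append, List.mem_singleton] at hx ⊢
      rcases hx with hx | rfl
      · by_cases hxc : x = current
        · subst hxc
          rcases hej with ⟨hor, hinb⟩
          rcases hor with rfl | rfl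
          · exact Or.inr rfl
          · -- ¬h2 : n2 not addable: since inb holds, n2 ∈ visited ++ [n1]
            have : pvNx2 arr x ∈ visited ++ [pvNx1 arr x] := by
              by_contra hc
              exact h2 ⟨hinb, hc⟩
            simpa using this
        · have hxq : x ∉ current :: rest := by
            simp only [List.mem_cons, not_or]
            exact ⟨hxc, hnq.1⟩
          exact Or.inl (hclo x hx hxq j hej)
      · exact absurd hnq.2 (by simp)
  | case6 visited current rest h1 h2 z2 =>
    intro _ _ hf
    rw [pvBfsLoop] at hf
    simp only [dif_neg h1, dif_pos h2, if_pos z2] at hf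
    cases hf
  | case7 visited current rest h1 h2 z2 ih =>
    intro hnz hclo hf
    rw [pvBfsLoop] at hf
    simp only [dif_neg h1, dif_pos h2, if_neg z2] at hf
    have key := ih ?_ ?_ hf
    · intro x hx k hk
      exact key x (by simp [hx]) k hk
    · intro x hx
      simp only [List.mem_append, List.mem_singleton] at hx
      rcases hx with hx | rfl
      · exact hnz x hx
      · exact z2
    · intro x hx hnq j hej
      simp only [List.mem_append, List.mem_singleton, not_or] at hnq
      simp only [List.mem_append, List.mem_singleton] at hx ⊢
      rcases hx with hx | rfl
      · by_cases hxc : x = current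
        · subst hxc
          rcases hej with ⟨hor, hinb⟩
          rcases hor with rfl | rfl
          · -- ¬h1 : since inb holds, n1 ∈ visited
            have : pvNx1 arr x ∈ visited := by
              by_contra hc
              exact h1 ⟨hinb, hc⟩
            exact Or.inl this
          · exact Or.inr rfl
        · have hxq : x ∉ current :: rest := by
            simp only [List.mem_cons, not_or]
            exact ⟨hxc, hnq.1⟩
          exact Or.inl (hclo x hx hxq j hej)
      · exact absurd hnq.2 (by simp)
  | case8 visited current rest h1 h2 ih =>
    intro hnz hclo hf
    rw [pvBfsLoop] at hf
    simp only [dif_neg h1, dif_neg h2] at hf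
    refine ih hnz ?_ hf
    intro x hx hnq j hej
    by_cases hxc : x = current
    · subst hxc
      rcases hej with ⟨hor, hinb⟩
      rcases hor with rfl | rfl
      · have : pvNx1 arr x ∈ visited := by
          by_contra hc
          exact h1 ⟨hinb, hc⟩
        exact this
      · have : pvNx2 arr x ∈ visited := by
          by_contra hc
          exact h2 ⟨hinb, hc⟩
        exact this
    · exact hclo x hx (by simp only [List.mem_cons, not_or]; exact ⟨hxc, hnq⟩) j hej

theorem pvDfsLoop_sound (arr : List Int) (start : Int) :
    ∀ stack visited hstk, (∀ x ∈ stack, pvReach arr start x) → (∀ x ∈ visited, pvReach arr start x) →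
      pvDfsLoop arr stack visited hstk = true →
      ∃ j, pvReach arr start j ∧ pvVal arr j = 0 := by
  intro stack visited hstk
  induction stack, visited, hstk using pvDfsLoop.induct arr with
  | case1 visited hstk _ =>
    intro _ _ ht
    rw [pvDfsLoop] at ht
    cases ht
  | case2 visited i rest hstk hiv _ ih =>
    intro hs hv ht
    rw [pvDfsLoop] at ht
    simp only [if_pos hiv] at ht
    exact ih (fun x hx => hs x (List.mem_cons_of_mem _ hx)) hv ht
  | case3 visited i rest hstk hiv hz _ =>
    intro hs _ _
    exact ⟨i, hs i List.mem_cons_self, hz⟩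
  | case4 visited i rest hstk hiv hz h1 h2 _ ih =>
    intro hs hv ht
    rw [pvDfsLoop] at ht
    simp only [if_neg hiv, if_neg hz, dif_pos h1, dif_pos h2] at ht
    have hi : pvReach arr start i := hs i List.mem_cons_self
    refine ih ?_ ?_ ht
    · intro x hx
      rcases List.mem_cons.mp hx with rfl | hx
      · exact Relation.ReflTransGen.tail hi ⟨Or.inr rfl, h2⟩
      · rcases List.mem_cons.mp hx with rfl | hx
        · exact Relation.ReflTransGen.tail hi ⟨Or.inl rfl, h1⟩
        · exact hs x (List.mem_cons_of_mem _ hx)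
    · intro x hx
      rcases List.mem_append.mp hx with hx | hx
      · exact hv x hx
      · rcases List.mem_singleton.mp hx with rfl
        exact hi
  | case5 visited i rest hstk hiv hz h1 h2 _ ih =>
    intro hs hv ht
    rw [pvDfsLoop] at ht
    simp only [if_neg hiv, if_neg hz, dif_pos h1, dif_neg h2] at ht
    have hi : pvReach arr start i := hs i List.mem_cons_self
    refine ih ?_ ?_ ht
    · intro x hx
      rcases List.mem_cons.mp hx with rfl | hx
      · exact Relation.ReflTransGen.tail hi ⟨Or.inl rfl, h1⟩
      · exact hs x (List.mem_cons_of_mem _ hx)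
    · intro x hx
      rcases List.mem_append.mp hx with hx | hx
      · exact hv x hx
      · rcases List.mem_singleton.mp hx with rfl
        exact hi
  | case6 visited i rest hstk hiv hz h1 h2 _ ih =>
    intro hs hv ht
    rw [pvDfsLoop] at ht
    simp only [if_neg hiv, if_neg hz, dif_neg h1, dif_pos h2] at ht
    have hi : pvReach arr start i := hs i List.mem_cons_self
    refine ih ?_ ?_ ht
    · intro x hx
      rcases List.mem_cons.mp hx with rfl | hx
      · exact Relation.ReflTransGen.tail hi ⟨Or.inr rfl, h2⟩
      · exact hs x (List.mem_cons_of_mem _ hx)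
    · intro x hx
      rcases List.mem_append.mp hx with hx | hx
      · exact hv x hx
      · rcases List.mem_singleton.mp hx with rfl
        exact hi
  | case7 visited i rest hstk hiv hz h1 h2 _ ih =>
    intro hs hv ht
    rw [pvDfsLoop] at ht
    simp only [if_neg hiv, if_neg hz, dif_neg h1, dif_neg h2] at ht
    have hi : pvReach arr start i := hs i List.mem_cons_self
    refine ih (fun x hx => hs x (List.mem_cons_of_mem _ hx)) ?_ ht
    intro x hx
    rcases List.mem_append.mp hx with hx | hx
    · exact hv x hx
    · rcases List.mem_singleton.mp hx with rfl
      exact hi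

theorem pvDfsLoop_complete (arr : List Int) :
    ∀ stack visited hstk,
      (∀ x ∈ visited, pvVal arr x ≠ 0 ∧ ∀ j, pvEdge arr x j → j ∈ visited ∨ j ∈ stack) →
      pvDfsLoop arr stack visited hstk = false →
      ∀ x, (x ∈ stack ∨ x ∈ visited) → ∀ k, pvReach arr x k → pvVal arr k ≠ 0 := by
  intro stack visited hstk
  induction stack, visited, hstk using pvDfsLoop.induct arr with
  | case1 visited hstk _ =>
    intro hv _ x hx k hk
    rcases hx with hx | hx
    · cases hx
    · have hin : ∀ k, pvReach arr x k → k ∈ visited := by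
        intro k hk
        induction hk with
        | refl => exact hx
        | tail h e ih =>
          rcases (hv _ ih).2 _ e with h' | h'
          · exact h'
          · cases h'
      exact (hv k (hin k hk)).1
  | case2 visited i rest hstk hiv _ ih =>
    intro hv hf x hx k hk
    rw [pvDfsLoop] at hf
    simp only [if_pos hiv] at hf
    refine ih ?_ hf x ?_ k hk
    · intro y hy
      refine ⟨(hv y hy).1, fun j hej => ?_⟩
      rcases (hv y hy).2 j hej with h' | h'
      · exact Or.inl h'
      · rcases List.mem_cons.mp h' with rfl | h''
        · exact Or.inl hiv
        · exact Or.inr h''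
    · rcases hx with hx | hx
      · rcases List.mem_cons.mp hx with rfl | hx
        · exact Or.inr hiv
        · exact Or.inl hx
      · exact Or.inr hx
  | case3 visited i rest hstk hiv hz _ =>
    intro _ hf
    rw [pvDfsLoop] at hf
    simp only [if_neg hiv, if_pos hz] at hf
    cases hf
  | case4 visited i rest hstk hiv hz h1 h2 _ ih =>
    intro hv hf x hx k hk
    rw [pvDfsLoop] at hf
    simp only [if_neg hiv, if_neg hz, dif_pos h1, dif_pos h2] at hf
    refine ih ?_ hf x ?_ k hk
    · intro y hy
      rcases List.mem_append.mp hy with hy | hy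
      · refine ⟨(hv y hy).1, fun j hej => ?_⟩
        rcases (hv y hy).2 j hej with h' | h'
        · exact Or.inl (List.mem_append_left _ h')
        · rcases List.mem_cons.mp h' with rfl | h''
          · exact Or.inl (List.mem_append_right _ List.mem_cons_self)
          · exact Or.inr (List.mem_cons_of_mem _ (List.mem_cons_of_mem _ h''))
      · rcases List.mem_singleton.mp hy with rfl
        refine ⟨hz, fun j hej => ?_⟩
        rcases hej with ⟨hor, hinb⟩
        rcases hor with rfl | rfl
        · exact Or.inr (List.mem_cons_of_mem _ List.mem_cons_self)
        · exact Or.inr List.mem_cons_self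
    · rcases hx with hx | hx
      · rcases List.mem_cons.mp hx with rfl | hx
        · exact Or.inr (List.mem_append_right _ List.mem_cons_self)
        · exact Or.inl (List.mem_cons_of_mem _ (List.mem_cons_of_mem _ hx))
      · exact Or.inr (List.mem_append_left _ hx)
  | case5 visited i rest hstk hiv hz h1 h2 _ ih =>
    intro hv hf x hx k hk
    rw [pvDfsLoop] at hf
    simp only [if_neg hiv, if_neg hz, dif_pos h1, dif_neg h2] at hf
    refine ih ?_ hf x ?_ k hk
    · intro y hy
      rcases List.mem_append.mp hy with hy | hy
      · refine ⟨(hv y hy).1, fun j hej => ?_⟩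
        rcases (hv y hy).2 j hej with h' | h'
        · exact Or.inl (List.mem_append_left _ h')
        · rcases List.mem_cons.mp h' with rfl | h''
          · exact Or.inl (List.mem_append_right _ List.mem_cons_self)
          · exact Or.inr (List.mem_cons_of_mem _ h'')
      · rcases List.mem_singleton.mp hy with rfl
        refine ⟨hz, fun j hej => ?_⟩
        rcases hej with ⟨hor, hinb⟩
        rcases hor with rfl | rfl
        · exact Or.inr List.mem_cons_self
        · exact absurd hinb h2
    · rcases hx with hx | hx
      · rcases List.mem_cons.mp hx with rfl | hx
        · exact Or.inr (List.mem_append_right _ List.mem_cons_self)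
        · exact Or.inl (List.mem_cons_of_mem _ hx)
      · exact Or.inr (List.mem_append_left _ hx)
  | case6 visited i rest hstk hiv hz h1 h2 _ ih =>
    intro hv hf x hx k hk
    rw [pvDfsLoop] at hf
    simp only [if_neg hiv, if_neg hz, dif_neg h1, dif_pos h2] at hf
    refine ih ?_ hf x ?_ k hk
    · intro y hy
      rcases List.mem_append.mp hy with hy | hy
      · refine ⟨(hv y hy).1, fun j hej => ?_⟩
        rcases (hv y hy).2 j hej with h' | h'
        · exact Or.inl (List.mem_append_left _ h')
        · rcases List.mem_cons.mp h' with rfl | h''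
          · exact Or.inl (List.mem_append_right _ List.mem_cons_self)
          · exact Or.inr (List.mem_cons_of_mem _ h'')
      · rcases List.mem_singleton.mp hy with rfl
        refine ⟨hz, fun j hej => ?_⟩
        rcases hej with ⟨hor, hinb⟩
        rcases hor with rfl | rfl
        · exact absurd hinb h1
        · exact Or.inr List.mem_cons_self
    · rcases hx with hx | hx
      · rcases List.mem_cons.mp hx with rfl | hx
        · exact Or.inr (List.mem_append_right _ List.mem_cons_self)
        · exact Or.inl (List.mem_cons_of_mem _ hx)
      · exact Or.inr (List.mem_append_left _ hx)
  | case7 visited i rest hstk hiv hz h1 h2 _ ih =>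
    intro hv hf x hx k hk
    rw [pvDfsLoop] at hf
    simp only [if_neg hiv, if_neg hz, dif_neg h1, dif_neg h2] at hf
    refine ih ?_ hf x ?_ k hk
    · intro y hy
      rcases List.mem_append.mp hy with hy | hy
      · refine ⟨(hv y hy).1, fun j hej => ?_⟩
        rcases (hv y hy).2 j hej with h' | h'
        · exact Or.inl (List.mem_append_left _ h')
        · rcases List.mem_cons.mp h' with rfl | h''
          · exact Or.inl (List.mem_append_right _ List.mem_cons_self)
          · exact Or.inr h''
      · rcases List.mem_singleton.mp hy with rfl
        refine ⟨hz, fun j hej => ?_⟩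
        rcases hej with ⟨hor, hinb⟩
        rcases hor with rfl | rfl
        · exact absurd hinb h1
        · exact absurd hinb h2
    · rcases hx with hx | hx
      · rcases List.mem_cons.mp hx with rfl | hx
        · exact Or.inr (List.mem_append_right _ List.mem_cons_self)
        · exact Or.inl hx
      · exact Or.inr (List.mem_append_left _ hx)

theorem pvA_true_iff (arr : List Int) (start : Int)
    (h0 : -(arr.length : Int) ≤ start) (h1 : start < (arr.length : Int)) :
    canReach_approach1_bfs arr start = true ↔ ∃ j, pvReach arr start j ∧ pvVal arr j = 0 := by
  have hne : arr ≠ [] := by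
    intro h
    subst h
    simp only [List.length_nil, Nat.cast_zero, neg_zero] at h0 h1
    omega
  unfold canReach_approach1_bfs
  have hcond : ¬(arr = [] ∨ (arr.length : Int) ≤ start) := by
    push Not
    exact ⟨hne, by omega⟩
  rw [if_neg hcond]
  by_cases hz : pvVal arr start = 0
  · rw [if_pos hz]
    exact iff_of_true rfl ⟨start, Relation.ReflTransGen.refl, hz⟩
  · rw [if_neg hz]
    constructor
    · intro ht
      exact pvBfsLoop_sound arr start [start] [start]
        (fun x hx => by rcases List.mem_singleton.mp hx with rfl; exact Relation.ReflTransGen.refl)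
        (fun x hx => hx) ht
    · rintro ⟨j, hj, hjz⟩
      by_contra hf
      rw [Bool.not_eq_true] at hf
      exact pvBfsLoop_complete arr [start] [start]
        (fun x hx => by rcases List.mem_singleton.mp hx with rfl; exact hz)
        (fun x hx hnq => absurd hx hnq)
        hf start List.mem_cons_self j hj hjz

theorem pvB_true_iff (arr : List Int) (start : Int)
    (h0 : -(arr.length : Int) ≤ start) (h1 : start < (arr.length : Int)) :
    canReach_approach1_bfs_alt arr start = true ↔ ∃ j, pvReach arr start j ∧ pvVal arr j = 0 := by
  unfold canReach_approach1_bfs_alt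
  rw [dif_pos ⟨h0, h1⟩]
  constructor
  · intro ht
    exact pvDfsLoop_sound arr start [start] [] _
      (fun x hx => by rcases List.mem_singleton.mp hx with rfl; exact Relation.ReflTransGen.refl)
      (fun x hx => absurd hx (List.not_mem_nil)) ht
  · rintro ⟨j, hj, hjz⟩
    by_contra hf
    rw [Bool.not_eq_true] at hf
    exact pvDfsLoop_complete arr [start] [] _
      (fun x hx => absurd hx (List.not_mem_nil))
      hf start (Or.inl List.mem_cons_self) j hj hjz

-- ===== VERDICT (by name: the statement is the Claim_ definition above) =====
theorem canReach_approach1_bfs_spec : Claim_equal_canReach_approach1_bfs := by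
  intro arr start _ hpre
  unfold Spec_canReach_approach1_bfs
  by_cases hs : -(arr.length : Int) ≤ start ∧ start < (arr.length : Int)
  · have hA := pvA_true_iff arr start hs.1 hs.2
    have hB := pvB_true_iff arr start hs.1 hs.2
    exact Bool.coe_iff_coe.mp (hA.trans hB.symm)
  · -- outside: arr = [], or start ≥ len (Pre_ rules out start < -len on nonempty arr)
    have hb : canReach_approach1_bfs_alt arr start = false := by
      unfold canReach_approach1_bfs_alt
      simp [hs]
    have ha : canReach_approach1_bfs arr start = false := by
      unfold canReach_approach1_bfs
      rcases hpre with h | h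
      · subst h; simp
      · have : (arr.length : Int) ≤ start := by omega
        simp [this]
    rw [ha, hb]

@[simp]
theorem canReach_approach1_bfs_raises : Claim_raises_canReach_approach1_bfs := by
  unfold Claim_raises_canReach_approach1_bfs
  constructor
  · intro arr start _ hr hp
    rcases hr with ⟨hne, hlt⟩
    rcases hp with h | h
    · exact hne h
    · omega
  · exact ⟨by decide, by decide, by decide⟩
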